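-- pv_equiv track=rewrite | github.com/RandySteven/technical-test-abishar | assignment_3.py | sort_number
-- ===== SOURCE A (Python) =====
-- def sort_number(arr):
--     oddArr = []
--     evenArr = []
--     for i in range(0, len(arr)):
--         if arr[i] % 2 == 0:
--             evenArr.append(arr[i])
--         else:
--             oddArr.append(arr[i])
--
--     oddArr = sort(oddArr)
--     evenArr = sort(evenArr)
--
--     return evenArr + oddArr
--
-- def sort(arr):
--     for i in range(0, len(arr)):
--         for j in range(0, len(arr)):
--             if arr[i] > arr[j]:
--                 temp = arr[j]
--                 arr[j] = arr[i]
--                 arr[i] = temp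
--     return arr
-- ===== SOURCE B (Python) =====
-- def sort_number(arr):
--     s = sorted(arr, reverse=True)
--     evens = [x for x in s if x % 2 == 0]
--     odds = [x for x in s if x % 2 != 0]
--     return evens + odds
-- ===== Notes on version B (the rewrite author's own statement) =====
-- stated objective: faster
-- what changed: B sorts the whole list once descending with sorted() and then partitions the sorted list into evens and odds in one pass, instead of A's partition-first then quadratic double-loop swap sort of each half.
import Mathlib
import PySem

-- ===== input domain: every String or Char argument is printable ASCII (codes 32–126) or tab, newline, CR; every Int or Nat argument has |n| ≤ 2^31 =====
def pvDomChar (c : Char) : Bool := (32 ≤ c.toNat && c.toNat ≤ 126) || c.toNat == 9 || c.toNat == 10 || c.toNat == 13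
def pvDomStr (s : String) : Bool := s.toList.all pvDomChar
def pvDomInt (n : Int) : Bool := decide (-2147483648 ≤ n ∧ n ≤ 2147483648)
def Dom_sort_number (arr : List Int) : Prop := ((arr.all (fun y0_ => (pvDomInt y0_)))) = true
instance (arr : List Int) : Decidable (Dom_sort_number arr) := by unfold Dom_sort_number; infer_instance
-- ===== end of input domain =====

-- B replaces A's partition-then-quadratic-swap-sort-each-half by one descending sort of the
-- whole list followed by a single partition pass (objective: faster; A mutates its argument
-- in place in Python, B does not — the equivalence proved here is about the return value).

-- ===== PORT A =====
-- arr[j] = v for an index produced by range(0, len(arr)): nonnegative and in range,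
-- exactly where the Python assignment succeeds, so List.set at i.toNat is exact there.
def pyAssign (c : List Int) (i : Int) (v : Int) : List Int := c.set i.toNat v

-- body of A's inner loop: 'if arr[i] > arr[j]: temp = arr[j]; arr[j] = arr[i]; arr[i] = temp'
def pySwapStep (c : List Int) (i j : Int) : List Int :=
  if PySem.List.pyGetD c i 0 > PySem.List.pyGetD c j 0 then
    pyAssign (pyAssign c j (PySem.List.pyGetD c i 0)) i (PySem.List.pyGetD c j 0)
  else c

-- A's helper 'sort': the double loop of swaps
def pySortA (arr : List Int) : List Int :=
  (PySem.List.pyRange 0 (PySem.List.len arr) 1).foldl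
    (fun a i => (PySem.List.pyRange 0 (PySem.List.len a) 1).foldl (fun c j => pySwapStep c i j) a)
    arr

def sort_number (arr : List Int) : List Int :=
  -- state (oddArr, evenArr), appended to exactly as A's loop does
  let pr := (PySem.List.pyRange 0 (PySem.List.len arr) 1).foldl
    (fun (s : List Int × List Int) i =>
      if PySem.Int.mod (PySem.List.pyGetD arr i 0) 2 == 0 then (s.1, s.2 ++ [PySem.List.pyGetD arr i 0])
      else (s.1 ++ [PySem.List.pyGetD arr i 0], s.2)) ([], [])
  pySortA pr.2 ++ pySortA pr.1

-- ===== PORT B =====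
def sort_number_alt (arr : List Int) : List Int :=
  let s := PySem.List.sorted arr (fun x => x) true
  let evens := s.filter (fun x => PySem.Int.mod x 2 == 0)
  let odds := s.filter (fun x => PySem.Int.mod x 2 != 0)
  evens ++ odds

-- ===== PRECONDITION & SPEC =====
def Spec_sort_number (arr : List Int) (out : List Int) : Prop := out = sort_number_alt arr
instance (arr : List Int) (out : List Int) : Decidable (Spec_sort_number arr out) := by unfold Spec_sort_number; infer_instance

-- ===== CLAIM (what is proved, stated in full; the proofs are below) =====
def Claim_equal_sort_number : Prop := ∀ (arr : List Int), Dom_sort_number arr → Spec_sort_number arr (sort_number arr)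

-- ===== LEMMAS AND PROOFS =====

-- Nat-indexed form of A's swap step (the pyRange indices are casts of Nats)
def natSwap (c : List Int) (i j : Nat) : List Int :=
  if c.getD j 0 < c.getD i 0 then (c.set j (c.getD i 0)).set i (c.getD j 0) else c

-- Nat-indexed form of A's 'sort'
def natSort (arr : List Int) : List Int :=
  (List.range arr.length).foldl
    (fun a i => (List.range a.length).foldl (fun c j => natSwap c i j) a) arr

lemma getD_set_self (l : List Int) (i : Nat) (v : Int) (h : i < l.length) :
    (l.set i v).getD i 0 = v := by simp [List.getD, h]

lemma getD_set_ne (l : List Int) (i k : Nat) (v : Int) (h : i ≠ k) :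
    (l.set i v).getD k 0 = l.getD k 0 := by simp [List.getD, h]

lemma foldl_pyRange_zero_nat {α : Type} (m : Nat) (F : α → Int → α) (x : α) :
    (PySem.List.pyRange 0 (m : Int) 1).foldl F x = (List.range m).foldl (fun a (k : Nat) => F a (k : Int)) x := by
  rw [PySem.List.pyRange_zero_nat, List.foldl_map]

lemma pySwapStep_natCast (c : List Int) (i j : Nat) : pySwapStep c (i : Int) (j : Int) = natSwap c i j := by
  simp [pySwapStep, natSwap, pyAssign, PySem.List.pyGetD_natCast]

lemma pySortA_eq_natSort (l : List Int) : pySortA l = natSort l := by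
  unfold pySortA natSort
  rw [PySem.List.len_eq, foldl_pyRange_zero_nat]
  refine List.foldl_ext _ _ l ?_
  intro a i _
  rw [PySem.List.len_eq, foldl_pyRange_zero_nat]
  refine List.foldl_ext _ _ a ?_
  intro c j _
  exact pySwapStep_natCast c i j

lemma foldl_range_inv {α : Type} (f : α → Nat → α) (I : Nat → α → Prop) :
    ∀ (n : Nat) (x : α), I 0 x → (∀ j c, j < n → I j c → I (j + 1) (f c j)) →
      I n ((List.range n).foldl f x) := by
  intro n
  induction n with
  | zero => intro x h0 _; simpa using h0
  | succ n ih =>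
    intro x h0 hs
    rw [List.range_succ, List.foldl_append]
    exact hs n _ n.lt_succ_self (ih x h0 (fun j c hj => hs j c (Nat.lt_succ_of_lt hj)))

lemma cons_set_perm : ∀ (t : List Int) (k : Nat) (x : Int), k < t.length →
    (t.getD k 0 :: t.set k x).Perm (x :: t) := by
  intro t
  induction t with
  | nil => intro k x h; simp at h
  | cons y s ih =>
    intro k x h
    cases k with
    | zero => simpa [List.getD] using List.Perm.swap x y s
    | succ k =>
      have hk : k < s.length := by simpa using h
      have p1 : (s.getD k 0 :: y :: s.set k x).Perm (y :: s.getD k 0 :: s.set k x) :=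
        List.Perm.swap _ _ _
      have p2 : (y :: s.getD k 0 :: s.set k x).Perm (y :: x :: s) := List.Perm.cons y (ih k x hk)
      have p3 : (y :: x :: s).Perm (x :: y :: s) := List.Perm.swap _ _ _
      simpa [List.getD] using (p1.trans (p2.trans p3))

lemma set_set_perm : ∀ (l : List Int) (i j : Nat), i < l.length → j < l.length →
    ((l.set j (l.getD i 0)).set i (l.getD j 0)).Perm l := by
  intro l
  induction l with
  | nil => intro i j h; simp at h
  | cons x t ih =>
    intro i j hi hj
    cases i with
    | zero =>
      cases j with
      | zero => simp [List.getD]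
      | succ j =>
        have hj' : j < t.length := by simpa using hj
        simpa [List.getD] using cons_set_perm t j x hj'
    | succ i =>
      have hi' : i < t.length := by simpa using hi
      cases j with
      | zero => simpa [List.getD] using cons_set_perm t i x hi'
      | succ j =>
        have hj' : j < t.length := by simpa using hj
        simpa [List.getD] using List.Perm.cons x (ih i j hi' hj')

-- c.getD is weakly decreasing on indices below j
def SortedTo (c : List Int) (j : Nat) : Prop :=
  ∀ m m', m < m' → m' < j → c.getD m' 0 ≤ c.getD m 0

-- invariant of A's inner loop (outer index i, inner index j, current list c, original list a)
def InnerInv (a : List Int) (i j : Nat) (c : List Int) : Prop :=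
  c.Perm a ∧ c.length = a.length ∧
  (∀ k, j ≤ k → k ≠ i → c.getD k 0 = a.getD k 0) ∧
  (j ≤ i → SortedTo c j ∧ (∀ m, m < j → c.getD i 0 ≤ c.getD m 0) ∧
    (∀ m, m < j → ∀ k, j ≤ k → k < i → a.getD k 0 ≤ c.getD m 0)) ∧
  (i < j → SortedTo c (i + 1))

lemma natSwap_inv (a : List Int) (i : Nat) (hi : i < a.length) (hs : SortedTo a i)
    (j : Nat) (c : List Int) (hj : j < a.length) (h : InnerInv a i j c) :
    InnerInv a i (j + 1) (natSwap c i j) := by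
  obtain ⟨hP, hL, hM, hA, hB⟩ := h
  unfold natSwap
  by_cases hlt : c.getD j 0 < c.getD i 0
  · -- swap branch; i ≠ j since the comparison is strict
    have hij : i ≠ j := by intro e; rw [e] at hlt; exact lt_irrefl _ hlt
    rw [if_pos hlt]
    have hci : ((c.set j (c.getD i 0)).set i (c.getD j 0)).getD i 0 = c.getD j 0 :=
      getD_set_self _ i _ (by simp; omega)
    have hcj : ((c.set j (c.getD i 0)).set i (c.getD j 0)).getD j 0 = c.getD i 0 := by
      rw [getD_set_ne _ i j _ hij, getD_set_self _ j _ (by omega)]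
    have hck : ∀ k, k ≠ i → k ≠ j →
        ((c.set j (c.getD i 0)).set i (c.getD j 0)).getD k 0 = c.getD k 0 := by
      intro k hki hkj
      rw [getD_set_ne _ i k _ (fun e => hki e.symm), getD_set_ne _ j k _ (fun e => hkj e.symm)]
    refine ⟨(set_set_perm c i j (by omega) (by omega)).trans hP, by simpa using hL, ?_, ?_, ?_⟩
    · intro k hk hki
      rw [hck k hki (by omega)]
      exact hM k (by omega) hki
    · intro hji1
      have hji : j < i := by omega
      obtain ⟨hS, hBnd, hC⟩ := hA (by omega)
      refine ⟨?_, ?_, ?_⟩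
      · intro m m' hmm' hm'
        by_cases hm'j : m' = j
        · rw [hm'j, hcj, hck m (by omega) (by omega)]
          exact hBnd m (by omega)
        · rw [hck m' (by omega) hm'j, hck m (by omega) (by omega)]
          exact hS m m' hmm' (by omega)
      · intro m hm
        rw [hci]
        by_cases hmj : m = j
        · rw [hmj, hcj]
          exact le_of_lt hlt
        · rw [hck m (by omega) hmj]
          have h1 := hC m (by omega) j le_rfl hji
          have h2 := hM j le_rfl (by omega)
          omega
      · intro m hm k hk hki
        by_cases hmj : m = j
        · rw [hmj, hcj]
          have h1 : a.getD k 0 ≤ a.getD j 0 := hs j k (by omega) hki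
          have h2 : c.getD j 0 = a.getD j 0 := hM j le_rfl (by omega)
          have h3 : c.getD j 0 < c.getD i 0 := hlt
          omega
        · rw [hck m (by omega) hmj]
          exact hC m (by omega) k (by omega) hki
    · intro hij1
      have hS := hB (by omega)
      intro m m' hmm' hm'
      by_cases hm'i : m' = i
      · rw [hm'i, hci, hck m (by omega) (by omega)]
        have h1 : c.getD i 0 ≤ c.getD m 0 := hS m i (by omega) (by omega)
        have h2 : c.getD j 0 < c.getD i 0 := hlt
        omega
      · rw [hck m' hm'i (by omega), hck m (by omega) (by omega)]
        exact hS m m' hmm' hm'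
  · -- no swap
    rw [if_neg hlt]
    rw [not_lt] at hlt
    refine ⟨hP, hL, ?_, ?_, ?_⟩
    · intro k hk hki
      exact hM k (by omega) hki
    · intro hji1
      have hji : j < i := by omega
      obtain ⟨hS, hBnd, hC⟩ := hA (by omega)
      have hcja : c.getD j 0 = a.getD j 0 := hM j le_rfl (by omega)
      refine ⟨?_, ?_, ?_⟩
      · intro m m' hmm' hm'
        by_cases hm'j : m' = j
        · rw [hm'j]
          have h1 := hC m (by omega) j le_rfl hji
          omega
        · exact hS m m' hmm' (by omega)
      · intro m hm
        by_cases hmj : m = j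
        · rw [hmj]
          exact hlt
        · exact hBnd m (by omega)
      · intro m hm k hk hki
        by_cases hmj : m = j
        · rw [hmj]
          have h1 := hs j k (by omega) hki
          omega
        · exact hC m (by omega) k (by omega) hki
    · intro hij1
      by_cases hij : j = i
      · obtain ⟨hS, hBnd, _⟩ := hA (by omega)
        intro m m' hmm' hm'
        by_cases hm'i : m' = i
        · rw [hm'i]
          exact hBnd m (by omega)
        · exact hS m m' hmm' (by omega)
      · exact hB (by omega)

lemma inner_spec (a : List Int) (i : Nat) (hi : i < a.length) (hs : SortedTo a i) :
    ((List.range a.length).foldl (fun c j => natSwap c i j) a).Perm a ∧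
    ((List.range a.length).foldl (fun c j => natSwap c i j) a).length = a.length ∧
    SortedTo ((List.range a.length).foldl (fun c j => natSwap c i j) a) (i + 1) := by
  have h0 : InnerInv a i 0 a := by
    refine ⟨List.Perm.refl a, rfl, fun k _ _ => rfl, ?_, by omega⟩
    intro _
    exact ⟨fun m m' _ h => by omega, fun m h => by omega, fun m h _ _ _ => by omega⟩
  have := foldl_range_inv (fun c j => natSwap c i j) (InnerInv a i) a.length a h0
    (fun j c hj hc => natSwap_inv a i hi hs j c hj hc)
  obtain ⟨hP, hL, _, _, hB⟩ := this
  exact ⟨hP, hL, hB hi⟩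

lemma sortedTo_pairwise (c : List Int) (h : SortedTo c c.length) : c.Pairwise (· ≥ ·) := by
  rw [List.pairwise_iff_getElem]
  intro p q hp hq hpq
  have := h p q hpq hq
  rwa [List.getD_eq_getElem _ _ hp, List.getD_eq_getElem _ _ hq] at this

lemma natSort_spec (arr : List Int) : (natSort arr).Perm arr ∧ (natSort arr).Pairwise (· ≥ ·) := by
  unfold natSort
  have hstep : ∀ i c, i < arr.length →
      (c.Perm arr ∧ c.length = arr.length ∧ SortedTo c i) →
      ((List.range c.length).foldl (fun c' j => natSwap c' i j) c).Perm arr ∧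
      ((List.range c.length).foldl (fun c' j => natSwap c' i j) c).length = arr.length ∧
      SortedTo ((List.range c.length).foldl (fun c' j => natSwap c' i j) c) (i + 1) := by
    intro i c hi hc
    obtain ⟨hP, hL, hS⟩ := hc
    have := inner_spec c i (by omega) hS
    exact ⟨this.1.trans hP, by rw [this.2.1]; exact hL, this.2.2⟩
  have main := foldl_range_inv
    (fun a i => (List.range a.length).foldl (fun c j => natSwap c i j) a)
    (fun i c => c.Perm arr ∧ c.length = arr.length ∧ SortedTo c i)
    arr.length arr ⟨List.Perm.refl arr, rfl, fun m m' _ h => by omega⟩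
    (fun i c hi hc => hstep i c hi hc)
  obtain ⟨hP, hL, hS⟩ := main
  refine ⟨hP, sortedTo_pairwise _ ?_⟩
  rw [hL]
  exact hS

-- A's partition loop, as a fold over the list, equals a pair of filters
lemma partition_foldl (p : Int → Bool) :
    ∀ (l : List Int) (o e : List Int),
      l.foldl (fun s x => if p x then (s.1, s.2 ++ [x]) else (s.1 ++ [x], s.2)) (o, e)
        = (o ++ l.filter (fun x => !p x), e ++ l.filter p) := by
  intro l
  induction l with
  | nil => intro o e; simp
  | cons x t ih =>
    intro o e
    by_cases hx : p x <;> simp [hx, ih]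

-- the central fact: A's quadratic sort of a filtered half equals the filter of B's single descending sort
lemma half_eq (p : Int → Bool) (arr : List Int) :
    natSort (arr.filter p) = (PySem.List.sorted arr (fun x => x) true).filter p := by
  obtain ⟨hP, hPW⟩ := natSort_spec (arr.filter p)
  refine PySem.List.eq_of_perm_of_pairwise_le_of_injective (fun x : Int => -x) neg_injective
    (hP.trans (((PySem.List.sorted_perm arr (fun x => x) true).filter p).symm)) ?_ ?_
  · exact hPW.imp (fun h => by simpa using h)
  · exact ((PySem.List.sorted_pairwise_rev arr (fun x => x)).filter p).imp (fun h => by simpa using h)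

-- ===== VERDICT (by name: the statement is the Claim_ definition above) =====
theorem sort_number_spec : Claim_equal_sort_number := by
  intro arr _
  unfold Spec_sort_number sort_number sort_number_alt
  rw [PySem.List.foldl_pyRange_zero_pyGetD arr 0
    (fun s x => if PySem.Int.mod x 2 == 0 then (s.1, s.2 ++ [x]) else (s.1 ++ [x], s.2)) ([], [])]
  rw [partition_foldl (fun x => PySem.Int.mod x 2 == 0) arr [] []]
  simp only [List.nil_append]
  rw [pySortA_eq_natSort, pySortA_eq_natSort,
    half_eq (fun x => PySem.Int.mod x 2 == 0) arr,
    half_eq (fun x => !(PySem.Int.mod x 2 == 0)) arr]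
  rfl
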